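-- pv_equiv track=rewrite | github.com/mta-tech/seeknal | src/seeknal/workflow/executors/python_executor.py | _extract_pep723_header
-- ===== SOURCE A (Python) =====
-- def _extract_pep723_header(content: str) -> str:
--     """Extract PEP 723 inline script metadata.
--
--     Args:
--         content: Python file content
--
--     Returns:
--         PEP 723 header string or empty string if not found
--     """
--     lines = content.split("\n")
--     header_lines = []
--     in_header = False
--
--     for line in lines:
--         if line.strip() == "# /// script":
--             in_header = True
--         if in_header:
--             header_lines.append(line)
--         if line.strip() == "# ///" and in_header:
--             break
--
--     return "\n".join(header_lines) if header_lines else ""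
-- ===== SOURCE B (Python) =====
-- def _extract_pep723_header(content: str) -> str:
--     lines = content.split("\n")
--     start = next((i for i, l in enumerate(lines) if l.strip() == "# /// script"), None)
--     if start is None:
--         return ""
--     for j in range(start, len(lines)):
--         if lines[j].strip() == "# ///":
--             return "\n".join(lines[start:j + 1])
--     return "\n".join(lines[start:])
-- ===== Notes on version B (the rewrite author's own statement) =====
-- stated objective: simpler
-- what changed: Replaces the boolean-flag accumulator loop with a locate-boundaries-then-slice decomposition: find the index of the first start-marker line, find the first closing-marker line at or after it, and join the slice between them inclusively (or the whole tail if no closer exists).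
import Mathlib
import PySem

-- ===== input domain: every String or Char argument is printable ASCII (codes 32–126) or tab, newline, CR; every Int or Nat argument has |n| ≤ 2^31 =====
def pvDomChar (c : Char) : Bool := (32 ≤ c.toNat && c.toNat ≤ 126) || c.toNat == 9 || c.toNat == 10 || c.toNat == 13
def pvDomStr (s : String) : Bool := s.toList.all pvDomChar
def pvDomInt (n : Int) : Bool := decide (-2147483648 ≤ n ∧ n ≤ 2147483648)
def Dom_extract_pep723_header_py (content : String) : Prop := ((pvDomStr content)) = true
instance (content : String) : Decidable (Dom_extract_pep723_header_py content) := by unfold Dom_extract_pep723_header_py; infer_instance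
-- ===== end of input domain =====

-- B replaces A's boolean-flag accumulator loop with a locate-boundaries-then-slice decomposition (objective: simpler).


-- ===== PORT A =====
-- A's for-loop with break: state (header_lines, in_header), structural recursion over the lines.
def pvALoop : List String → List String → Bool → List String
  | [], acc, _ => acc
  | l :: ls, acc, inHeader =>
    let inHeader := if PySem.Str.strip l == "# /// script" then true else inHeader
    let acc := if inHeader then acc ++ [l] else acc
    if PySem.Str.strip l == "# ///" && inHeader then acc
    else pvALoop ls acc inHeader

def extract_pep723_header_py (content : String) : String :=
  let lines := (PySem.Str.split? content "\n").getD []  -- sep ≠ "", so split? is always `some`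
  let headerLines := pvALoop lines [] false
  if headerLines ≠ [] then PySem.Str.join "\n" headerLines else ""

-- ===== PORT B =====
def extract_pep723_header_py_alt (content : String) : String :=
  let lines := (PySem.Str.split? content "\n").getD []  -- sep ≠ "", so split? is always `some`
  match lines.findIdx? (fun l => PySem.Str.strip l == "# /// script") with
  | none => ""
  | some start =>
    let tail := lines.drop start
    match tail.findIdx? (fun l => PySem.Str.strip l == "# ///") with
    | some j => PySem.Str.join "\n" (tail.take (j + 1))   -- lines[start : start+j+1]
    | none => PySem.Str.join "\n" tail                     -- lines[start:]

-- ===== PRECONDITION & SPEC =====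
def Spec_extract_pep723_header_py (content : String) (out : String) : Prop := out = extract_pep723_header_py_alt content
instance (content : String) (out : String) : Decidable (Spec_extract_pep723_header_py content out) := by unfold Spec_extract_pep723_header_py; infer_instance

-- ===== CLAIM (what is proved, stated in full; the proofs are below) =====
def Claim_equal_extract_pep723_header_py : Prop := ∀ (content : String), Dom_extract_pep723_header_py content → Spec_extract_pep723_header_py content (extract_pep723_header_py content)

-- ===== LEMMAS AND PROOFS =====

-- Phase 2 (in_header = true): the loop appends lines up to and including the first closer.
lemma pvALoop_true (ls : List String) (acc : List String) :
    pvALoop ls acc true =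
      acc ++ (match ls.findIdx? (fun l => PySem.Str.strip l == "# ///") with
              | some j => ls.take (j + 1)
              | none => ls) := by
  induction ls generalizing acc with
  | nil => simp [pvALoop]
  | cons l ls ih =>
    by_cases h : PySem.Str.strip l == "# ///"
    · simp [pvALoop, h, List.findIdx?_cons]
    · have step : pvALoop (l :: ls) acc true = pvALoop ls (acc ++ [l]) true := by
        simp [pvALoop, h]
      rw [step, ih]
      cases hf : ls.findIdx? (fun l => PySem.Str.strip l == "# ///") with
      | none => simp [List.findIdx?_cons, h, hf]
      | some j => simp [List.findIdx?_cons, h, hf, List.take_succ_cons]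

-- Phase 1 (in_header = false): nothing accumulates until the first start marker.
lemma pvALoop_false (ls : List String) :
    pvALoop ls [] false =
      (match ls.findIdx? (fun l => PySem.Str.strip l == "# /// script") with
       | none => []
       | some i =>
         match (ls.drop i).findIdx? (fun l => PySem.Str.strip l == "# ///") with
         | some j => (ls.drop i).take (j + 1)
         | none => ls.drop i) := by
  induction ls with
  | nil => simp [pvALoop]
  | cons l ls ih =>
    by_cases h : PySem.Str.strip l == "# /// script"
    · have hne : (PySem.Str.strip l == "# ///") = false := by
        have hl : PySem.Str.strip l = "# /// script" := by simpa using h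
        simp [hl]
      have step : pvALoop (l :: ls) [] false = pvALoop ls [l] true := by
        simp [pvALoop, h, hne]
      rw [step, pvALoop_true]
      cases hf : ls.findIdx? (fun l => PySem.Str.strip l == "# ///") with
      | none => simp [List.findIdx?_cons, h, hne, hf]
      | some j => simp [List.findIdx?_cons, h, hne, hf, List.take_succ_cons]
    · have step : pvALoop (l :: ls) [] false = pvALoop ls [] false := by
        simp [pvALoop, h]
      rw [step, ih]
      cases hf : ls.findIdx? (fun l => PySem.Str.strip l == "# /// script") with
      | none => simp [List.findIdx?_cons, h, hf]
      | some i => simp [List.findIdx?_cons, h, hf]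

-- ===== VERDICT (by name: the statement is the Claim_ definition above) =====
theorem extract_pep723_header_py_spec : Claim_equal_extract_pep723_header_py := by
  intro content _
  unfold Spec_extract_pep723_header_py extract_pep723_header_py extract_pep723_header_py_alt
  simp only [pvALoop_false]
  set lines := (PySem.Str.split? content "\n").getD [] with hlines
  cases hf : lines.findIdx? (fun l => PySem.Str.strip l == "# /// script") with
  | none => simp
  | some i =>
    have hi : i < lines.length := (List.findIdx?_eq_some_iff_findIdx_eq.mp hf).1
    have hdrop : lines.drop i ≠ [] := by
      simpa [List.drop_eq_nil_iff] using Nat.not_le.mpr hi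
    cases hf2 : (lines.drop i).findIdx? (fun l => PySem.Str.strip l == "# ///") with
    | none => simp [hf2, hdrop]
    | some j =>
      have htake : (lines.drop i).take (j + 1) ≠ [] := by
        cases hc : lines.drop i with
        | nil => exact absurd hc hdrop
        | cons a as => simp
      simp [hf2, htake]
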